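-- pv_equiv track=rewrite | github.com/CharlesCNorton/AI-Bootstrap | hott-coq-docs/organized_docs/docorganizer.py | find_category
-- ===== SOURCE A (Python) =====
-- def find_category(file_name):
--     """
--     Define a mapping for categories based on file names.
--     This is a simplified example. You can expand it based on your folder hierarchy.
--     """
--     categories = {
--         "Algebra": ["AbelianGroup", "Abelianization", "Algebra", "Rings", "Groups"],
--         "Basics": ["Basics", "Utf8", "Overture", "Tactics"],
--         "Categories": ["Category", "Functor", "Limits", "Grothendieck"],
--         "Homotopy": ["PathGroupoids", "Suspension", "WhiteheadsPrinciple"],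
--         "HIT": ["Interval", "Quotient", "SetCone"],
--         "Truncations": ["Trunc", "Truncations", "TruncType"],
--     }
--
--     for category, files in categories.items():
--         if file_name in files:
--             return category
--     return "Miscellaneous"  # Default category for uncategorized files
-- ===== SOURCE B (Python) =====
-- # Flat keyword -> category table written out once; the per-call scan over each
-- # category's keyword list disappears, the function is one dict lookup.
-- _KEYWORD_TO_CATEGORY = {
--     "AbelianGroup": "Algebra", "Abelianization": "Algebra", "Algebra": "Algebra",
--     "Rings": "Algebra", "Groups": "Algebra",
--     "Basics": "Basics", "Utf8": "Basics", "Overture": "Basics", "Tactics": "Basics",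
--     "Category": "Categories", "Functor": "Categories", "Limits": "Categories",
--     "Grothendieck": "Categories",
--     "PathGroupoids": "Homotopy", "Suspension": "Homotopy",
--     "WhiteheadsPrinciple": "Homotopy",
--     "Interval": "HIT", "Quotient": "HIT", "SetCone": "HIT",
--     "Trunc": "Truncations", "Truncations": "Truncations", "TruncType": "Truncations",
-- }
--
--
-- def find_category(file_name):
--     return _KEYWORD_TO_CATEGORY.get(file_name, "Miscellaneous")
-- ===== Notes on version B (the rewrite author's own statement) =====
-- stated objective: idiomatic
-- what changed: Replaces the per-call loop scanning each category's keyword list with a single flat keyword-to-category dict (all 22 keywords are distinct, so first-match order is moot); the function body is one dict.get with a default.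
import Mathlib
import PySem

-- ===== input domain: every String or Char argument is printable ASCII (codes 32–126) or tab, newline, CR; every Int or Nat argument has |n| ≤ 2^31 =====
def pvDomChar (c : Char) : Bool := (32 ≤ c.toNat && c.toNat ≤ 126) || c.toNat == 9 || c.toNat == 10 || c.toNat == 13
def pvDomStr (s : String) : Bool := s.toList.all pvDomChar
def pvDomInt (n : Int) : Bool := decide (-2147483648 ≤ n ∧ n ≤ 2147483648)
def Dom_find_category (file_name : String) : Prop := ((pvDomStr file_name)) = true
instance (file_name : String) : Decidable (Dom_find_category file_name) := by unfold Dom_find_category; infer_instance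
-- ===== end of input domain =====

-- B flattens the nested category→keywords table into one keyword→category dict
-- (all 22 keywords are distinct) and answers with a single lookup; A scans each
-- category's keyword list per call.

-- ===== PORT A =====
-- the literal dict of A, as an insertion-ordered association list
def pvCategoriesA : List (String × List String) :=
  [("Algebra", ["AbelianGroup", "Abelianization", "Algebra", "Rings", "Groups"]),
   ("Basics", ["Basics", "Utf8", "Overture", "Tactics"]),
   ("Categories", ["Category", "Functor", "Limits", "Grothendieck"]),
   ("Homotopy", ["PathGroupoids", "Suspension", "WhiteheadsPrinciple"]),
   ("HIT", ["Interval", "Quotient", "SetCone"]),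
   ("Truncations", ["Trunc", "Truncations", "TruncType"])]

-- A's 'for category, files in categories.items(): if file_name in files: return category'
def pvFindLoopA (file_name : String) : List (String × List String) → String
  | [] => "Miscellaneous"
  | (category, files) :: rest =>
      if files.contains file_name then category else pvFindLoopA file_name rest

def find_category (file_name : String) : String :=
  pvFindLoopA file_name pvCategoriesA

-- ===== PORT B =====
-- Source B's module-level flat dict literal _KEYWORD_TO_CATEGORY
def pvKeywordToCategory : PySem.Dict String String :=
  PySem.Dict.ofList
    [("AbelianGroup", "Algebra"), ("Abelianization", "Algebra"), ("Algebra", "Algebra"),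
     ("Rings", "Algebra"), ("Groups", "Algebra"),
     ("Basics", "Basics"), ("Utf8", "Basics"), ("Overture", "Basics"), ("Tactics", "Basics"),
     ("Category", "Categories"), ("Functor", "Categories"), ("Limits", "Categories"),
     ("Grothendieck", "Categories"),
     ("PathGroupoids", "Homotopy"), ("Suspension", "Homotopy"),
     ("WhiteheadsPrinciple", "Homotopy"),
     ("Interval", "HIT"), ("Quotient", "HIT"), ("SetCone", "HIT"),
     ("Trunc", "Truncations"), ("Truncations", "Truncations"), ("TruncType", "Truncations")]

def find_category_alt (file_name : String) : String :=
  pvKeywordToCategory.getD file_name "Miscellaneous"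

-- ===== PRECONDITION & SPEC =====
def Spec_find_category (file_name : String) (out : String) : Prop := out = find_category_alt file_name
instance (file_name : String) (out : String) : Decidable (Spec_find_category file_name out) := by unfold Spec_find_category; infer_instance

-- ===== CLAIM (what is proved, stated in full; the proofs are below) =====
def Claim_equal_find_category : Prop := ∀ (file_name : String), Dom_find_category file_name → Spec_find_category file_name (find_category file_name)

-- ===== LEMMAS AND PROOFS =====

-- the flattened (keyword, category) list of a categories table
def pvFlat (pairs : List (String × List String)) : List (String × String) :=
  pairs.flatMap (fun p => p.2.map (fun f => (f, p.1)))

-- A's loop answers with the first match in the flattened list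
theorem pvFindLoopA_eq_flat (fn : String) (pairs : List (String × List String)) :
    pvFindLoopA fn pairs =
      (((pvFlat pairs).find? (fun q => q.1 == fn)).map (·.2)).getD "Miscellaneous" := by
  induction pairs with
  | nil => rfl
  | cons p rest ih =>
    obtain ⟨c, fs⟩ := p
    rw [show pvFlat ((c, fs) :: rest) = (fs.map (fun f => (f, c))) ++ pvFlat rest from rfl,
        List.find?_append, List.find?_map]
    by_cases h : fn ∈ fs
    · have hsome : (fs.find? (fun f => f == fn)).isSome := by
        rw [List.find?_isSome]
        exact ⟨fn, h, by simp⟩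
      obtain ⟨x, hx⟩ := Option.isSome_iff_exists.mp hsome
      simp [pvFindLoopA, h, Function.comp_def, hx]
    · have hnone : fs.find? (fun f => f == fn) = none := by
        rw [List.find?_eq_none]
        intro x hx
        simp only [Bool.not_eq_true, beq_eq_false_iff_ne, ne_eq]
        rintro rfl
        exact h hx
      simp [pvFindLoopA, h, Function.comp_def, hnone, ih]

-- lookup in a literal Dict.mk is the first match in its pair list
theorem get?_mk_eq_find? (fn : String) (l : List (String × String)) :
    (PySem.Dict.mk l).get? fn = (l.find? (fun q => q.1 == fn)).map (·.2) := by
  induction l with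
  | nil => rfl
  | cons p t ih =>
    obtain ⟨k, v⟩ := p
    rw [PySem.Dict.get?_mk_cons, List.find?_cons]
    by_cases h : k == fn
    · simp [h]
    · have hf : ((k, v).1 == fn) = false := by simpa using h
      simp [h, ih]

-- ===== VERDICT (by name: the statement is the Claim_ definition above) =====
theorem find_category_spec : Claim_equal_find_category := by
  intro fn _
  unfold Spec_find_category find_category find_category_alt
  rw [pvFindLoopA_eq_flat, PySem.Dict.getD_eq_get?_getD,
      show pvKeywordToCategory = PySem.Dict.mk (pvFlat pvCategoriesA) from by decide,
      get?_mk_eq_find?]
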